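-- pv_equiv track=rewrite | github.com/dth12/algorithm | programmers/위클리 챌린지/1주차_부족한 금액 계산하기.py | solution
-- ===== SOURCE A (Python) =====
-- def solution(price, money, count):
--     total = 0
--     for i in range(1, count + 1):
--         total += price * i
--
--     if money < total:
--         return total - money
--     else:
--         return 0
-- ===== SOURCE B (Python) =====
-- def solution(price, money, count):
--     n = max(count, 0)
--     total = price * n * (n + 1) // 2
--     return max(total - money, 0)
-- ===== Notes on version B (the rewrite author's own statement) =====
-- stated objective: faster
-- what changed: Replaces the O(count) accumulation loop with the arithmetic-series closed form price*n*(n+1)//2 and a max() for the shortfall.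
import Mathlib
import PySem

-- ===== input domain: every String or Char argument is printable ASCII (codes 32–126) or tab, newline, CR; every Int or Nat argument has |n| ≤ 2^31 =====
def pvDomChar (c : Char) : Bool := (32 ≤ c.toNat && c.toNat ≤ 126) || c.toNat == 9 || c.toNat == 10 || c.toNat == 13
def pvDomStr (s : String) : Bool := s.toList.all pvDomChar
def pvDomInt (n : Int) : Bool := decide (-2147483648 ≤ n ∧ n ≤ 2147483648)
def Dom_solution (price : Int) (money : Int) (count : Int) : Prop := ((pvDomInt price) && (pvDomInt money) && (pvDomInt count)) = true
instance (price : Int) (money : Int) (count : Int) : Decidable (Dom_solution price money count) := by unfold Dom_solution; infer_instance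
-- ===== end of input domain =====

-- B replaces A's O(count) summation loop by the O(1) arithmetic-series closed form.

-- ===== PORT A =====
def solution (price : Int) (money : Int) (count : Int) : Int :=
  let total := (PySem.List.pyRange 1 (count + 1) 1).foldl (fun total i => total + price * i) 0
  if money < total then total - money else 0

-- ===== PORT B =====
def solution_alt (price : Int) (money : Int) (count : Int) : Int :=
  let n := max count 0
  let total := PySem.Int.floordiv (price * n * (n + 1)) 2
  max (total - money) 0

-- ===== PRECONDITION & SPEC =====
def Spec_solution (price : Int) (money : Int) (count : Int) (out : Int) : Prop := out = solution_alt price money count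
instance (price : Int) (money : Int) (count : Int) (out : Int) : Decidable (Spec_solution price money count out) := by unfold Spec_solution; infer_instance

-- ===== CLAIM (what is proved, stated in full; the proofs are below) =====
def Claim_equal_solution : Prop := ∀ (price : Int) (money : Int) (count : Int), Dom_solution price money count → Spec_solution price money count (solution price money count)

-- ===== LEMMAS AND PROOFS =====

lemma pv_sum_key (price : Int) (m : Nat) :
    (PySem.List.pyRange 1 ((m : Int) + 1) 1).foldl (fun total i => total + price * i) 0 * 2
      = price * (m : Int) * ((m : Int) + 1) := by
  induction m with
  | zero => simp [PySem.List.pyRange_one_eq_nil]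
  | succ k ih =>
      have h : PySem.List.pyRange 1 ((k : Int) + 1 + 1) 1
          = PySem.List.pyRange 1 ((k : Int) + 1) 1 ++ [(k : Int) + 1] :=
        PySem.List.pyRange_one_succ_right (by omega)
      push_cast
      rw [h, List.foldl_append]
      simp only [List.foldl_cons, List.foldl_nil]
      nlinarith [ih]

lemma pv_total_eq (price count : Int) :
    (PySem.List.pyRange 1 (count + 1) 1).foldl (fun total i => total + price * i) 0
      = PySem.Int.floordiv (price * max count 0 * (max count 0 + 1)) 2 := by
  rcases le_or_gt count 0 with h | h
  · have hmax : max count 0 = 0 := by omega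
    rw [PySem.List.pyRange_one_eq_nil (by omega), hmax]
    simp [PySem.Int.floordiv_eq_ediv_of_pos]
  · have hmax : max count 0 = count := by omega
    obtain ⟨m, rfl⟩ : ∃ m : Nat, count = (m : Int) := ⟨count.toNat, by omega⟩
    have hk := pv_sum_key price m
    rw [hmax, PySem.Int.floordiv_eq_ediv_of_pos (by omega)]
    omega

-- ===== VERDICT (by name: the statement is the Claim_ definition above) =====
theorem solution_spec : Claim_equal_solution := by
  intro price money count _
  unfold Spec_solution solution solution_alt
  rw [pv_total_eq]
  dsimp only
  split_ifs <;> omega
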